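-- pv_equiv track=rewrite | github.com/imdarshik/Turbolab-coding-test-solutions | answer_2.py | check_string_match
-- ===== SOURCE A (Python) =====
-- def check_string_match(s1,s2):
--
--     if len(s1) != len(s2):
--         return 'DIFFERENT'
--
--     else:
--
--         if s1.count('e') > s2.count('e'):
--             s1 = s1.replace('#','f')
--             s2 = s2.replace('#','e')
--
--         elif s1.count('f') > s2.count('f'):
--             s1 = s1.replace('#','e')
--             s2 = s2.replace('#','f')
--
--         if s1 == s2:
--             return 'MATCH'
--
--         else:
--
--             for i in range(len(s1)-1):
--                 if s1[i] != s2[i]: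
--                     s1 = list(s1)
--                     t = s1[i]
--                     s1[i] = s1[i+1]
--                     s1[i+1] = t
--                     s1 = ''.join(s1)
--
--                 if s1 == s2:
--                     return 'MATCH'
--
--             if s1 != s2:
--                 return "DIFFERENT"
-- ===== SOURCE B (Python) =====
-- def check_string_match(s1, s2):
--     if len(s1) != len(s2):
--         return 'DIFFERENT'
--     if s1.count('e') > s2.count('e'):
--         s1 = s1.replace('#', 'f')
--         s2 = s2.replace('#', 'e')
--     elif s1.count('f') > s2.count('f'):
--         s1 = s1.replace('#', 'e')
--         s2 = s2.replace('#', 'f')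
--     t = list(s1)
--     diff = sum(1 for a, b in zip(t, s2) if a != b)
--     if diff == 0:
--         return 'MATCH'
--     for i in range(len(t) - 1):
--         if t[i] != s2[i]:
--             old = 1 + (t[i + 1] != s2[i + 1])
--             t[i], t[i + 1] = t[i + 1], t[i]
--             new = (t[i] != s2[i]) + (t[i + 1] != s2[i + 1])
--             diff += new - old
--             if diff == 0:
--                 return 'MATCH'
--     return 'DIFFERENT'
-- ===== Notes on version B (the rewrite author's own statement) =====
-- stated objective: faster
-- what changed: B replaces A's full string re-comparison after every adjacent swap with a mismatch counter updated in O(1) per swap, making the scan linear instead of quadratic.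
import Mathlib
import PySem

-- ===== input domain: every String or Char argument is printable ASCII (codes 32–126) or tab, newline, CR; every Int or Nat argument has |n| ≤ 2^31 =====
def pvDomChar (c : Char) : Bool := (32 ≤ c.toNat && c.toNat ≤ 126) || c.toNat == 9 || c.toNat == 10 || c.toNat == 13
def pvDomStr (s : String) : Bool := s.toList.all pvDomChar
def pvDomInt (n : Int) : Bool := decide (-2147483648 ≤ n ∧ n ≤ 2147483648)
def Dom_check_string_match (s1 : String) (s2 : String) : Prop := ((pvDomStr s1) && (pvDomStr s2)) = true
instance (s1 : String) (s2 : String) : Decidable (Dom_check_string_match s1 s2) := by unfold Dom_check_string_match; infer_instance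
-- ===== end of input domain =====

-- B keeps an incremental mismatch counter updated in O(1) per adjacent swap instead of
-- A's full string re-comparison after every step, making the scan linear (objective: faster).

-- ===== PORT A =====
-- str.replace with a single-char pattern and replacement is exactly a character map (exact here)
def pvRepl (l : List Char) (o n : Char) : List Char := l.map fun c => if c = o then n else c

-- A's for-loop: for each i, swap s1[i],s1[i+1] on mismatch, then compare the whole strings.
-- The [] case's 'else "MATCH"' branch transcribes Python's fall-through (unreachable: the inner
-- equality test has already fired whenever s1 == s2 there).
def loopA (s2 : List Char) : List Nat → List Char → String
  | [], t1 => if t1 ≠ s2 then "DIFFERENT" else "MATCH"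
  | i :: rest, t1 =>
    let t1' := if t1.getD i ' ' ≠ s2.getD i ' '
      then (t1.set i (t1.getD (i+1) ' ')).set (i+1) (t1.getD i ' ')
      else t1
    if t1' = s2 then "MATCH" else loopA s2 rest t1'

def check_string_match (s1 : String) (s2 : String) : String :=
  let l1 := s1.toList
  let l2 := s2.toList
  if l1.length ≠ l2.length then "DIFFERENT"
  else
    let p := if l1.count 'e' > l2.count 'e' then (pvRepl l1 '#' 'f', pvRepl l2 '#' 'e')
             else if l1.count 'f' > l2.count 'f' then (pvRepl l1 '#' 'e', pvRepl l2 '#' 'f')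
             else (l1, l2)
    if p.1 = p.2 then "MATCH"
    else loopA p.2 (List.range (p.1.length - 1)) p.1

-- ===== PORT B =====
-- sum(1 for a, b in zip(t, s2) if a != b)
def mismCount (t s : List Char) : Nat := (t.zip s).countP fun p => p.1 != p.2

-- B's for-loop: on a mismatch at i, swap and update the counter from the two touched positions.
def loopB (s2 : List Char) : List Nat → List Char → Int → String
  | [], _, _ => "DIFFERENT"
  | i :: rest, t, diff =>
    if t.getD i ' ' ≠ s2.getD i ' ' then
      let old : Int := 1 + (if t.getD (i+1) ' ' ≠ s2.getD (i+1) ' ' then 1 else 0)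
      let t' := (t.set i (t.getD (i+1) ' ')).set (i+1) (t.getD i ' ')
      let nw : Int := (if t'.getD i ' ' ≠ s2.getD i ' ' then 1 else 0)
                    + (if t'.getD (i+1) ' ' ≠ s2.getD (i+1) ' ' then 1 else 0)
      let diff' := diff + (nw - old)
      if diff' = 0 then "MATCH" else loopB s2 rest t' diff'
    else loopB s2 rest t diff

def check_string_match_alt (s1 : String) (s2 : String) : String :=
  let l1 := s1.toList
  let l2 := s2.toList
  if l1.length ≠ l2.length then "DIFFERENT"
  else
    let p := if l1.count 'e' > l2.count 'e' then (pvRepl l1 '#' 'f', pvRepl l2 '#' 'e')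
             else if l1.count 'f' > l2.count 'f' then (pvRepl l1 '#' 'e', pvRepl l2 '#' 'f')
             else (l1, l2)
    let diff : Int := mismCount p.1 p.2
    if diff = 0 then "MATCH"
    else loopB p.2 (List.range (p.1.length - 1)) p.1 diff

-- ===== PRECONDITION & SPEC =====
def Spec_check_string_match (s1 : String) (s2 : String) (out : String) : Prop := out = check_string_match_alt s1 s2
instance (s1 : String) (s2 : String) (out : String) : Decidable (Spec_check_string_match s1 s2 out) := by unfold Spec_check_string_match; infer_instance

-- ===== CLAIM (what is proved, stated in full; the proofs are below) =====
def Claim_equal_check_string_match : Prop := ∀ (s1 : String) (s2 : String), Dom_check_string_match s1 s2 → Spec_check_string_match s1 s2 (check_string_match s1 s2)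

-- ===== LEMMAS AND PROOFS =====

lemma mism_zero_iff : ∀ (t s : List Char), t.length = s.length → (mismCount t s = 0 ↔ t = s) := by
  intro t
  induction t with
  | nil => intro s h; cases s <;> simp_all [mismCount]
  | cons a t ih =>
    intro s h
    cases s with
    | nil => simp at h
    | cons b s =>
      simp only [List.length_cons, Nat.add_right_cancel_iff] at h
      by_cases hab : a = b <;> simp_all [mismCount, List.zip]

lemma mism_set : ∀ (t s : List Char) (i : Nat) (x : Char), i < t.length → t.length = s.length →
    mismCount (t.set i x) s + (if t.getD i ' ' ≠ s.getD i ' ' then 1 else 0)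
      = mismCount t s + (if x ≠ s.getD i ' ' then 1 else 0) := by
  intro t
  induction t with
  | nil => intro s i x hi; simp at hi
  | cons a t ih =>
    intro s i x hi h
    cases s with
    | nil => simp at h
    | cons b s =>
      simp only [List.length_cons, Nat.add_right_cancel_iff] at h
      cases i with
      | zero =>
        by_cases hab : a = b <;> by_cases hxb : x = b <;> simp [mismCount, hab, hxb]
      | succ j =>
        simp only [List.length_cons, Nat.succ_lt_succ_iff] at hi
        have := ih s j x hi h
        by_cases hab : a = b <;> simp [mismCount, hab] at * <;> omega

-- One-step unfoldings of the two loops (proof-only restatements of the ports' equations).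
lemma loopA_swap (s2 : List Char) (i : Nat) (rest : List Nat) (t : List Char)
    (h : t.getD i ' ' ≠ s2.getD i ' ') :
    loopA s2 (i :: rest) t =
      (if (t.set i (t.getD (i+1) ' ')).set (i+1) (t.getD i ' ') = s2 then "MATCH"
       else loopA s2 rest ((t.set i (t.getD (i+1) ' ')).set (i+1) (t.getD i ' '))) := by
  simp only [List.getD] at h
  simp [loopA, h]

lemma loopA_noswap (s2 : List Char) (i : Nat) (rest : List Nat) (t : List Char)
    (h : t.getD i ' ' = s2.getD i ' ') (hne : t ≠ s2) :
    loopA s2 (i :: rest) t = loopA s2 rest t := by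
  simp only [List.getD] at h
  simp [loopA, h, hne]

lemma loopB_swap (s2 : List Char) (i : Nat) (rest : List Nat) (t : List Char) (d : Int)
    (h : t.getD i ' ' ≠ s2.getD i ' ') :
    loopB s2 (i :: rest) t d =
      (if d + ((((if ((t.set i (t.getD (i+1) ' ')).set (i+1) (t.getD i ' ')).getD i ' ' ≠ s2.getD i ' ' then (1:Int) else 0)
            + (if ((t.set i (t.getD (i+1) ' ')).set (i+1) (t.getD i ' ')).getD (i+1) ' ' ≠ s2.getD (i+1) ' ' then (1:Int) else 0)))
           - (1 + (if t.getD (i+1) ' ' ≠ s2.getD (i+1) ' ' then (1:Int) else 0))) = 0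
       then "MATCH"
       else loopB s2 rest ((t.set i (t.getD (i+1) ' ')).set (i+1) (t.getD i ' '))
              (d + ((((if ((t.set i (t.getD (i+1) ' ')).set (i+1) (t.getD i ' ')).getD i ' ' ≠ s2.getD i ' ' then (1:Int) else 0)
                + (if ((t.set i (t.getD (i+1) ' ')).set (i+1) (t.getD i ' ')).getD (i+1) ' ' ≠ s2.getD (i+1) ' ' then (1:Int) else 0)))
               - (1 + (if t.getD (i+1) ' ' ≠ s2.getD (i+1) ' ' then (1:Int) else 0))))) := by
  simp only [List.getD] at h
  simp [loopB, h]

lemma loopB_noswap (s2 : List Char) (i : Nat) (rest : List Nat) (t : List Char) (d : Int)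
    (h : t.getD i ' ' = s2.getD i ' ') :
    loopB s2 (i :: rest) t d = loopB s2 rest t d := by
  simp only [List.getD] at h
  simp [loopB, h]

lemma loop_eq (s2 : List Char) : ∀ (idxs : List Nat) (t : List Char), t.length = s2.length →
    (∀ i ∈ idxs, i + 1 < s2.length) → t ≠ s2 →
    loopA s2 idxs t = loopB s2 idxs t (mismCount t s2) := by
  intro idxs
  induction idxs with
  | nil =>
    intro t _ _ hne
    simp [loopA, loopB, hne]
  | cons i rest ih =>
    intro t hlen hidx hne
    have hi1 : i + 1 < s2.length := hidx i (by simp)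
    have hi1t : i + 1 < t.length := by omega
    have hit : i < t.length := by omega
    have hrest : ∀ j ∈ rest, j + 1 < s2.length := fun j hj => hidx j (List.mem_cons_of_mem _ hj)
    by_cases hc : t.getD i ' ' = s2.getD i ' '
    · rw [loopA_noswap s2 i rest t hc hne, loopB_noswap s2 i rest t _ hc]
      exact ih t hlen hrest hne
    · rw [loopA_swap s2 i rest t hc, loopB_swap s2 i rest t _ hc]
      have hgi' : ((t.set i (t.getD (i+1) ' ')).set (i+1) (t.getD i ' ')).getD i ' '
          = t.getD (i+1) ' ' := by
        simp [List.getD, hit]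
      have hgi1' : ((t.set i (t.getD (i+1) ' ')).set (i+1) (t.getD i ' ')).getD (i+1) ' '
          = t.getD i ' ' := by
        simp [List.getD, hi1t]
      rw [hgi', hgi1']
      have hg1 : (t.set i (t.getD (i+1) ' ')).getD (i+1) ' ' = t.getD (i+1) ' ' := by
        simp [List.getD, List.getElem?_set_ne (show i ≠ i+1 by omega)]
      have e1 := mism_set t s2 i (t.getD (i+1) ' ') hit hlen
      rw [if_pos hc] at e1
      have e2 := mism_set (t.set i (t.getD (i+1) ' ')) s2 (i+1) (t.getD i ' ')
        (by simpa using hi1t) (by simp [hlen])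
      rw [hg1] at e2
      have hm' : (mismCount ((t.set i (t.getD (i+1) ' ')).set (i+1) (t.getD i ' ')) s2 : Int)
          = (mismCount t s2 : Int)
            + (((if t.getD (i+1) ' ' ≠ s2.getD i ' ' then (1:Int) else 0)
                + (if t.getD i ' ' ≠ s2.getD (i+1) ' ' then (1:Int) else 0))
               - (1 + (if t.getD (i+1) ' ' ≠ s2.getD (i+1) ' ' then (1:Int) else 0))) := by
        generalize hm1 : mismCount (t.set i (t.getD (i+1) ' ')) s2 = m1 at e1 e2
        generalize hm2 : mismCount ((t.set i (t.getD (i+1) ' ')).set (i+1) (t.getD i ' ')) s2 = m2 at e2 ⊢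
        generalize hm0 : mismCount t s2 = m0 at e1 ⊢
        split_ifs at e1 e2 ⊢ <;> push_cast at e1 e2 ⊢ <;> omega
      rw [← hm']
      have hTlen : ((t.set i (t.getD (i+1) ' ')).set (i+1) (t.getD i ' ')).length = s2.length := by
        simp [hlen]
      by_cases hz : (t.set i (t.getD (i+1) ' ')).set (i+1) (t.getD i ' ') = s2
      · have h0 : mismCount ((t.set i (t.getD (i+1) ' ')).set (i+1) (t.getD i ' ')) s2 = 0 :=
          (mism_zero_iff _ s2 hTlen).2 hz
        rw [if_pos hz, if_pos (by exact_mod_cast congrArg (Nat.cast (R := Int)) h0)]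
      · have h0 : mismCount ((t.set i (t.getD (i+1) ' ')).set (i+1) (t.getD i ' ')) s2 ≠ 0 :=
          fun h => hz ((mism_zero_iff _ s2 hTlen).1 h)
        rw [if_neg hz, if_neg (by exact_mod_cast h0)]
        exact ih _ hTlen hrest hz

lemma main_core (a b : List Char) (hab : a.length = b.length) :
    (if a = b then "MATCH" else loopA b (List.range (a.length - 1)) a)
      = (if (mismCount a b : Int) = 0 then "MATCH"
         else loopB b (List.range (a.length - 1)) a (mismCount a b)) := by
  by_cases he : a = b
  · have h0 : mismCount a b = 0 := (mism_zero_iff a b hab).2 he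
    rw [if_pos he, if_pos (show (mismCount a b : Int) = 0 by exact_mod_cast h0)]
  · have hnz : mismCount a b ≠ 0 := fun h0 => he ((mism_zero_iff a b hab).1 h0)
    have hnzI : (mismCount a b : Int) ≠ 0 := by exact_mod_cast hnz
    rw [if_neg he, if_neg hnzI]
    exact loop_eq b (List.range (a.length - 1)) a hab
      (fun i hi => by simp [List.mem_range] at hi; omega) he

-- ===== VERDICT (by name: the statement is the Claim_ definition above) =====
theorem check_string_match_spec : Claim_equal_check_string_match := by
  intro s1 s2 _
  unfold Spec_check_string_match check_string_match check_string_match_alt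
  by_cases hl : s1.toList.length = s2.toList.length
  · rw [if_neg (not_not_intro hl), if_neg (not_not_intro hl)]
    exact main_core _ _ (by split_ifs <;> simp [pvRepl, hl])
  · rw [if_pos hl, if_pos hl]
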